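-- pv_equiv track=rewrite | github.com/davidlary/Curriculum-AI | scripts/step6_adaptivity.py | _optimize_for_visual_learning
-- ===== SOURCE A (Python) =====
-- from typing import Dict, List, Any, Optional, Tuple
--
-- def _optimize_for_visual_learning(curriculum_units: List[Dict]) -> List[Dict]:
--     """Optimize topic sequence for visual and kinesthetic learners."""
--     # Prioritize topics that benefit from visualization
--     visual_friendly_domains = [
--         'kinematics', 'waves', 'optics', 'electricity', 'magnetism',
--         'rotation', 'oscillations'
--     ]
--
--     visual_topics = []
--     other_topics = []
--
--     for unit in curriculum_units:
--         if unit.get('domain', '').lower() in visual_friendly_domains: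
--             visual_topics.append(unit)
--         else:
--             other_topics.append(unit)
--
--     # Interleave visual-friendly topics with others, prioritizing visual
--     optimized_sequence = []
--     v_idx = o_idx = 0
--
--     while v_idx < len(visual_topics) or o_idx < len(other_topics):
--         # Add 2 visual topics for every 1 other topic
--         for _ in range(2):
--             if v_idx < len(visual_topics):
--                 optimized_sequence.append(visual_topics[v_idx])
--                 v_idx += 1
--
--         if o_idx < len(other_topics):
--             optimized_sequence.append(other_topics[o_idx])
--             o_idx += 1
--
--     return optimized_sequence
-- ===== SOURCE B (Python) =====
-- from typing import Dict, List, Any, Optional, Tuple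
--
-- def _chunk2(xs):
--     res = []
--     while xs:
--         res.append(xs[:2])
--         xs = xs[2:]
--     return res
--
-- def _zip_longest2(xs, ys):
--     res = []
--     while xs or ys:
--         res.append((xs[0] if xs else None, ys[0] if ys else None))
--         xs, ys = xs[1:], ys[1:]
--     return res
--
-- def _optimize_for_visual_learning(curriculum_units: List[Dict]) -> List[Dict]:
--     """Optimize topic sequence for visual and kinesthetic learners."""
--     visual_friendly_domains = [
--         'kinematics', 'waves', 'optics', 'electricity', 'magnetism',
--         'rotation', 'oscillations'
--     ]
--     is_visual = lambda u: u.get('domain', '').lower() in visual_friendly_domains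
--     visual_topics = [u for u in curriculum_units if is_visual(u)]
--     other_topics = [u for u in curriculum_units if not is_visual(u)]
--
--     optimized_sequence = []
--     for chunk, other in _zip_longest2(_chunk2(visual_topics), other_topics):
--         if chunk is not None:
--             optimized_sequence.extend(chunk)
--         if other is not None:
--             optimized_sequence.append(other)
--     return optimized_sequence
-- ===== Notes on version B (the rewrite author's own statement) =====
-- stated objective: alternative
-- what changed: The index-driven while loop that mutates v_idx/o_idx is replaced by partitioning with comprehensions, chunking the visual topics into consecutive pairs, and flattening a hand-rolled zip_longest of the chunks with the other topics.
import Mathlib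
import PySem

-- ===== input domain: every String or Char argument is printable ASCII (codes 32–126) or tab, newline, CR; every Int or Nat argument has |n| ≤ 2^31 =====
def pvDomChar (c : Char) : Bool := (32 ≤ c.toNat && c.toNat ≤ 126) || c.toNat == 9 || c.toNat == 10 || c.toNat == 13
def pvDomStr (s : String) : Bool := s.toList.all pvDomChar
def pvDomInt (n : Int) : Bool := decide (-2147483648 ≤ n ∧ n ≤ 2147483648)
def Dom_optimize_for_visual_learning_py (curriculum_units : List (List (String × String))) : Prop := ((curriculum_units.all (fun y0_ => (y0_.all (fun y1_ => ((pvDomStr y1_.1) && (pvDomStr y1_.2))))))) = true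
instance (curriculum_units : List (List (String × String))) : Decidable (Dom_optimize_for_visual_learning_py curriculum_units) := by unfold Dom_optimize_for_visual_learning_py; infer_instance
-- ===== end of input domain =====

-- B differs from A only in decomposition: same partition, then pair-chunking + zip-longest flush instead of A's index-stepping while loop.

-- ===== PORT A =====
def pvVisualDomains : List String :=
  ["kinematics", "waves", "optics", "electricity", "magnetism", "rotation", "oscillations"]

-- unit.get('domain', '').lower() in visual_friendly_domains
def pvIsVisual (unit : List (String × String)) : Bool :=
  pvVisualDomains.contains (PySem.Str.lower ((PySem.Dict.ofList unit).getD "domain" ""))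

-- the while loop of A: take up to 2 visual topics, then up to 1 other topic, per round
def pvLoopA (vs os : List (List (String × String))) : List (List (String × String)) :=
  match vs, os with
  | [], [] => []
  | [], o :: os' => o :: pvLoopA [] os'
  | [v], [] => [v]
  | [v], o :: os' => v :: o :: pvLoopA [] os'
  | v1 :: v2 :: vs', [] => v1 :: v2 :: pvLoopA vs' []
  | v1 :: v2 :: vs', o :: os' => v1 :: v2 :: o :: pvLoopA vs' os'
termination_by vs.length + os.length

def optimize_for_visual_learning_py (curriculum_units : List (List (String × String))) : List (List (String × String)) :=
  let part := curriculum_units.foldl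
    (fun (acc : List (List (String × String)) × List (List (String × String))) u =>
      if pvIsVisual u then (acc.1 ++ [u], acc.2) else (acc.1, acc.2 ++ [u]))
    ([], [])
  pvLoopA part.1 part.2

-- ===== PORT B =====
-- _chunk2: consecutive pairs (a trailing singleton kept)
def pvChunk2 (xs : List (List (String × String))) : List (List (List (String × String))) :=
  match xs with
  | [] => []
  | [x] => [[x]]
  | x :: y :: r => [x, y] :: pvChunk2 r

-- _zip_longest2, hand-rolled with None padding
def pvZipLongest (xs : List (List (List (String × String)))) (ys : List (List (String × String))) :
    List (Option (List (List (String × String))) × Option (List (String × String))) :=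
  match xs, ys with
  | [], [] => []
  | [], y :: ys' => (none, some y) :: pvZipLongest [] ys'
  | x :: xs', [] => (some x, none) :: pvZipLongest xs' []
  | x :: xs', y :: ys' => (some x, some y) :: pvZipLongest xs' ys'
termination_by xs.length + ys.length

def optimize_for_visual_learning_py_alt (curriculum_units : List (List (String × String))) : List (List (String × String)) :=
  let visual_topics := curriculum_units.filter (fun u => pvIsVisual u)
  let other_topics := curriculum_units.filter (fun u => !pvIsVisual u)
  (pvZipLongest (pvChunk2 visual_topics) other_topics).foldl
    (fun acc p =>
      let acc := match p.1 with | some ch => acc ++ ch | none => acc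
      match p.2 with | some o => acc ++ [o] | none => acc)
    []

-- ===== PRECONDITION & SPEC =====
def Spec_optimize_for_visual_learning_py (curriculum_units : List (List (String × String))) (out : List (List (String × String))) : Prop := out = optimize_for_visual_learning_py_alt curriculum_units
instance (curriculum_units : List (List (String × String))) (out : List (List (String × String))) : Decidable (Spec_optimize_for_visual_learning_py curriculum_units out) := by unfold Spec_optimize_for_visual_learning_py; infer_instance

-- ===== CLAIM (what is proved, stated in full; the proofs are below) =====
def Claim_equal_optimize_for_visual_learning_py : Prop := ∀ (curriculum_units : List (List (String × String))), Dom_optimize_for_visual_learning_py curriculum_units → Spec_optimize_for_visual_learning_py curriculum_units (optimize_for_visual_learning_py curriculum_units)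

-- ===== LEMMAS AND PROOFS =====

-- the per-pair contribution of B's loop body
def pvG (p : Option (List (List (String × String))) × Option (List (String × String))) :
    List (List (String × String)) :=
  (p.1.getD []) ++ (match p.2 with | some o => [o] | none => [])

lemma pvFoldl_eq_flatMap (l : List (Option (List (List (String × String))) × Option (List (String × String))))
    (acc : List (List (String × String))) :
    l.foldl (fun acc p =>
      let acc := match p.1 with | some ch => acc ++ ch | none => acc
      match p.2 with | some o => acc ++ [o] | none => acc) acc
    = acc ++ l.flatMap pvG := by
  induction l generalizing acc with
  | nil => simp
  | cons p l ih =>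
    obtain ⟨c, o⟩ := p
    cases c <;> cases o <;> simp [ih, pvG]

lemma pvPartition_eq (l : List (List (String × String)))
    (a b : List (List (String × String))) :
    l.foldl (fun (acc : List (List (String × String)) × List (List (String × String))) u =>
      if pvIsVisual u then (acc.1 ++ [u], acc.2) else (acc.1, acc.2 ++ [u])) (a, b)
    = (a ++ l.filter (fun u => pvIsVisual u), b ++ l.filter (fun u => !pvIsVisual u)) := by
  induction l generalizing a b with
  | nil => simp
  | cons u l ih =>
    by_cases h : pvIsVisual u <;> simp [h, ih]

lemma pvLoopA_eq (vs os : List (List (String × String))) :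
    pvLoopA vs os = (pvZipLongest (pvChunk2 vs) os).flatMap pvG := by
  induction vs, os using pvLoopA.induct with
  | case1 => simp [pvLoopA, pvChunk2, pvZipLongest]
  | case2 o os' ih => simp [pvLoopA, pvChunk2, pvZipLongest, pvG] at ih ⊢; exact ih
  | case3 v => simp [pvLoopA, pvChunk2, pvZipLongest, pvG]
  | case4 v o os' ih => simp [pvLoopA, pvChunk2, pvZipLongest, pvG] at ih ⊢; exact ih
  | case5 v1 v2 vs' ih => simp [pvLoopA, pvChunk2, pvZipLongest, pvG] at ih ⊢; exact ih
  | case6 v1 v2 vs' o os' ih => simp [pvLoopA, pvChunk2, pvZipLongest, pvG] at ih ⊢; exact ih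

-- ===== VERDICT (by name: the statement is the Claim_ definition above) =====
theorem optimize_for_visual_learning_py_spec : Claim_equal_optimize_for_visual_learning_py := by
  intro cu _
  unfold Spec_optimize_for_visual_learning_py optimize_for_visual_learning_py
    optimize_for_visual_learning_py_alt
  rw [pvPartition_eq, pvFoldl_eq_flatMap]
  simpa using pvLoopA_eq _ _
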